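-- pv_equiv track=rewrite | github.com/Roonil03/AdventOfCode2024_R03 | Day12/straightBoundary.py | calculate
-- ===== SOURCE A (Python) =====
-- from collections import deque
--
-- class Grid:
--     def __init__(self, gridData):
--         self.grid = [list(row) for row in gridData]
--         self.gridHeight = len(self.grid)
--         self.gridWidth = len(self.grid[0])
--
--     @classmethod
--     def fromText(cls, values):
--         return cls(values)
--
--     def cellRange(self):
--         for row in range(self.gridHeight):
--             for col in range(self.gridWidth):
--                 yield (col, row)
--
--     def getNeighbors(self, startPoint=(0, 0)):
--         col, row = startPoint
--         directions = [(0, 1), (0, -1), (1, 0), (-1, 0)]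
--         return [
--             (col + dCol, row + dRow)
--             for dCol, dRow in directions
--             if 0 <= col + dCol < self.gridWidth and 0 <= row + dRow < self.gridHeight
--         ]
--
-- def calculate(values):
--     grid = Grid.fromText(values)
--     regions = []
--     for cell in grid.cellRange():
--         if grid.grid[cell[1]][cell[0]] != "#":
--             currentValue = grid.grid[cell[1]][cell[0]]
--             grid.grid[cell[1]][cell[0]] = "#"
--             regions.append(set([cell]))
--             processingQueue = deque([cell])
--             while processingQueue:
--                 currentCell = processingQueue.popleft()
--                 for neighbor in grid.getNeighbors(startPoint=currentCell):
--                     if grid.grid[neighbor[1]][neighbor[0]] == currentValue: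
--                         grid.grid[neighbor[1]][neighbor[0]] = "#"
--                         processingQueue.append(neighbor)
--                         regions[-1].add(neighbor)
--     totalValue = 0
--     for region in regions:
--         sideCount = 0
--         for offset in [(0, 1), (0, -1), (1, 0), (-1, 0)]:
--             regionSides = set()
--             for cell in region:
--                 adjacentCell = (cell[0] + offset[0], cell[1] + offset[1])
--                 if adjacentCell not in region:
--                     regionSides.add(adjacentCell)
--             removable = set()
--             for side in regionSides:
--                 linked = (side[0] + offset[1], side[1] + offset[0])
--                 while linked in regionSides:
--                     removable.add(linked)
--                     linked = (linked[0] + offset[1], linked[1] + offset[0])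
--             sideCount += len(regionSides) - len(removable)
--         totalValue += len(region) * sideCount
--     return totalValue
-- ===== SOURCE B (Python) =====
-- from collections import deque
--
-- def calculate(values):
--     grid = [list(row) for row in values]
--     height = len(grid)
--     width = len(grid[0])
--     total = 0
--     for row in range(height):
--         for col in range(width):
--             if grid[row][col] != "#":
--                 value = grid[row][col]
--                 grid[row][col] = "#"
--                 region = {(col, row)}
--                 queue = deque([(col, row)])
--                 while queue:
--                     c, r = queue.popleft()
--                     for dc, dr in ((0, 1), (0, -1), (1, 0), (-1, 0)):
--                         nc, nr = c + dc, r + dr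
--                         if 0 <= nc < width and 0 <= nr < height and grid[nr][nc] == value:
--                             grid[nr][nc] = "#"
--                             region.add((nc, nr))
--                             queue.append((nc, nr))
--                 # one pass: a boundary edge starts a new straight side iff its
--                 # predecessor along the side's direction is not a boundary edge
--                 sides = 0
--                 for c, r in region:
--                     for dc, dr in ((0, 1), (0, -1), (1, 0), (-1, 0)):
--                         if (c + dc, r + dr) not in region and (
--                             (c - dr, r - dc) not in region
--                             or (c + dc - dr, r + dr - dc) in region
--                         ):
--                             sides += 1
--                 total += len(region) * sides
--     return total
-- ===== Notes on version B (the rewrite author's own statement) =====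
-- stated objective: faster
-- what changed: B replaces A's per-region side counting (build a boundary-cell set per direction, then walk chains from every boundary cell to find and subtract 'removable' continuations) by a single pass over the region's cells that counts side-starts directly (a boundary edge whose predecessor along the side's direction is not a boundary edge), folding the price into the flood-fill scan; the BFS flood fill itself is kept.
import Mathlib
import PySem

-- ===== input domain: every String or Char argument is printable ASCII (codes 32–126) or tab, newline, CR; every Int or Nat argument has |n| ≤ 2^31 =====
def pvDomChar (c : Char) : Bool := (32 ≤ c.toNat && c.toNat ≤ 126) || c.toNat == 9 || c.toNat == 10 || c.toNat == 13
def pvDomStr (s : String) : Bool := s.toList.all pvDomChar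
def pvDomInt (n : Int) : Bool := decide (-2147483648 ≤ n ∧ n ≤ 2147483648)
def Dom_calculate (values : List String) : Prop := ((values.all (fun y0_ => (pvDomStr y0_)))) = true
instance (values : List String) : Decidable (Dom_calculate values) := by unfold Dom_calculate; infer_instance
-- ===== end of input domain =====

-- B replaces A's per-region boundary-set + chain-removal side counting by a one-pass
-- count of side-starts per region cell (objective: faster; flood fill itself unchanged).

-- cells are (col, row) pairs of Python ints
abbrev PvCell := Int × Int

def pvDirs : List PvCell := [(0, 1), (0, -1), (1, 0), (-1, 0)]

-- grid[r][c] read / write of "#": exact under the guards 0 ≤ c < W, 0 ≤ r < H that both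
-- programs test before every access (rows have length ≥ W by Pre_calculate)
def pvGet (g : List (List Char)) (c r : Int) : Char := (g.getD r.toNat []).getD c.toNat ' '

def pvMark (g : List (List Char)) (c r : Int) : List (List Char) :=
  g.set r.toNat ((g.getD r.toNat []).set c.toNat '#')

-- ===== PORT A =====

-- Grid.getNeighbors
def pvNbrsA (W H : Int) (p : PvCell) : List PvCell :=
  (pvDirs.filter (fun d =>
      decide (0 ≤ p.1 + d.1 ∧ p.1 + d.1 < W ∧ 0 ≤ p.2 + d.2 ∧ p.2 + d.2 < H))).map
    (fun d => (p.1 + d.1, p.2 + d.2))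

-- the 'while processingQueue' loop; state (grid, queue, current region); fuel W*H+1
-- bounds the number of pops (each push marks a fresh cell) and is never exhausted
def pvBfsA (W H : Int) (v : Char) :
    Nat → List (List Char) × List PvCell × PySem.Set PvCell → List (List Char) × PySem.Set PvCell
  | 0, (g, _, reg) => (g, reg)
  | fuel + 1, (g, q, reg) =>
    match q with
    | [] => (g, reg)
    | cur :: rest =>
        pvBfsA W H v fuel
          ((pvNbrsA W H cur).foldl
            (fun st n =>
              if pvGet st.1 n.1 n.2 = v then
                (pvMark st.1 n.1 n.2, st.2.1 ++ [n], PySem.Set.add st.2.2 n)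
              else st)
            (g, rest, reg))

-- one 'for cell in grid.cellRange()' step of the flood-fill phase
def pvFloodA (W H : Int) (st : List (List Char) × List (PySem.Set PvCell)) (cell : PvCell) :
    List (List Char) × List (PySem.Set PvCell) :=
  if pvGet st.1 cell.1 cell.2 ≠ '#' then
    let v := pvGet st.1 cell.1 cell.2
    let res := pvBfsA W H v (W.toNat * H.toNat + 1)
      (pvMark st.1 cell.1 cell.2, [cell], PySem.Set.ofList [cell])
    (res.1, st.2 ++ [res.2])
  else st

-- 'while linked in regionSides: removable.add(linked); linked += perp'; fuel |S|+1
-- bounds the walk (it visits distinct members of S) and is never exhausted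
def pvWalkA (S : List PvCell) (perp : PvCell) :
    Nat → PvCell → PySem.Set PvCell → PySem.Set PvCell
  | 0, _, acc => acc
  | fuel + 1, linked, acc =>
    if linked ∈ S then
      pvWalkA S perp fuel (linked.1 + perp.1, linked.2 + perp.2) (PySem.Set.add acc linked)
    else acc

-- body of 'for offset in [...]': regionSides, removable, their size difference
def pvSidesOffA (reg : PySem.Set PvCell) (off : PvCell) : Int :=
  let S : PySem.Set PvCell := reg.foldl
    (fun (s : PySem.Set PvCell) cell =>
      if (cell.1 + off.1, cell.2 + off.2) ∈ reg then s
      else PySem.Set.add s (cell.1 + off.1, cell.2 + off.2))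
    []
  let rem : PySem.Set PvCell := S.foldl
    (fun acc side => pvWalkA S (off.2, off.1) (S.length + 1) (side.1 + off.2, side.2 + off.1) acc)
    []
  (S.length : Int) - (rem.length : Int)

def pvSideCountA (reg : PySem.Set PvCell) : Int :=
  pvDirs.foldl (fun k off => k + pvSidesOffA reg off) 0

def calculate (values : List String) : Int :=
  let grid := values.map String.toList
  let H : Int := grid.length
  let W : Int := (grid.headD []).length   -- len(self.grid[0]): Pre_ excludes the empty list
  let cells := (PySem.List.pyRange 0 H 1).flatMap
    (fun r => (PySem.List.pyRange 0 W 1).map (fun c => ((c, r) : PvCell)))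
  let regions := (cells.foldl (pvFloodA W H) (grid, [])).2
  regions.foldl (fun t reg => t + (reg.length : Int) * pvSideCountA reg) 0

-- ===== PORT B =====

-- B's 'while queue' loop: same BFS, neighbours tested inline instead of via getNeighbors
def pvBfsB (W H : Int) (v : Char) :
    Nat → List (List Char) × List PvCell × PySem.Set PvCell → List (List Char) × PySem.Set PvCell
  | 0, (g, _, reg) => (g, reg)
  | fuel + 1, (g, q, reg) =>
    match q with
    | [] => (g, reg)
    | cur :: rest =>
        pvBfsB W H v fuel
          (pvDirs.foldl
            (fun st d =>
              let n : PvCell := (cur.1 + d.1, cur.2 + d.2)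
              if (0 ≤ n.1 ∧ n.1 < W ∧ 0 ≤ n.2 ∧ n.2 < H) ∧ pvGet st.1 n.1 n.2 = v then
                (pvMark st.1 n.1 n.2, st.2.1 ++ [n], PySem.Set.add st.2.2 n)
              else st)
            (g, rest, reg))

-- B's one-pass side-start count over the region's cells
def pvSidesB (reg : PySem.Set PvCell) : Int :=
  reg.foldl
    (fun k cell =>
      pvDirs.foldl
        (fun k d =>
          if (cell.1 + d.1, cell.2 + d.2) ∉ reg ∧
              ((cell.1 - d.2, cell.2 - d.1) ∉ reg ∨
                (cell.1 + d.1 - d.2, cell.2 + d.2 - d.1) ∈ reg) then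
            k + 1
          else k)
        k)
    0

-- body of B's nested 'for row … for col …' scan: flood one region, add its price at once
def pvFloodB (W H : Int) (st : List (List Char) × Int) (cell : PvCell) :
    List (List Char) × Int :=
  if pvGet st.1 cell.1 cell.2 ≠ '#' then
    let v := pvGet st.1 cell.1 cell.2
    let res := pvBfsB W H v (W.toNat * H.toNat + 1)
      (pvMark st.1 cell.1 cell.2, [cell], PySem.Set.ofList [cell])
    (res.1, st.2 + (res.2.length : Int) * pvSidesB res.2)
  else st

def calculate_alt (values : List String) : Int :=
  let grid := values.map String.toList
  let H : Int := grid.length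
  let W : Int := (grid.headD []).length   -- len(grid[0]): Pre_ excludes the empty list
  ((PySem.List.pyRange 0 H 1).foldl
      (fun st r =>
        (PySem.List.pyRange 0 W 1).foldl (fun st c => pvFloodB W H st ((c, r) : PvCell)) st)
      (grid, (0 : Int))).2

-- ===== PRECONDITION & SPEC =====
-- Pre_ excludes exactly the inputs where Python A raises IndexError: the empty list
-- (len(self.grid[0])) and grids with a row shorter than the first row (grid[row][col]).
def Pre_calculate (values : List String) : Prop :=
  values ≠ [] ∧ ∀ s ∈ values, (values.headD "").toList.length ≤ s.toList.length

instance (values : List String) : Decidable (Pre_calculate values) := by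
  unfold Pre_calculate; infer_instance

def pvWitness_calculate : List String := ["aab", "bb#"]

def Spec_calculate (values : List String) (out : Int) : Prop := out = calculate_alt values
instance (values : List String) (out : Int) : Decidable (Spec_calculate values out) := by
  unfold Spec_calculate; infer_instance

-- ===== CLAIM (what is proved, stated in full; the proofs are below) =====
def Claim_equal_calculate : Prop :=
  ∀ (values : List String), Dom_calculate values → Pre_calculate values →
    Spec_calculate values (calculate values)

-- ===== LEMMAS AND PROOFS =====



theorem pvStep_eq (W H : Int) (v : Char) (cur : PvCell)
    (st : List (List Char) × List PvCell × PySem.Set PvCell) :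
    ((pvNbrsA W H cur).foldl
      (fun st n =>
        if pvGet st.1 n.1 n.2 = v then
          (pvMark st.1 n.1 n.2, st.2.1 ++ [n], PySem.Set.add st.2.2 n)
        else st) st)
    = pvDirs.foldl
      (fun st d =>
        let n : PvCell := (cur.1 + d.1, cur.2 + d.2)
        if (0 ≤ n.1 ∧ n.1 < W ∧ 0 ≤ n.2 ∧ n.2 < H) ∧ pvGet st.1 n.1 n.2 = v then
          (pvMark st.1 n.1 n.2, st.2.1 ++ [n], PySem.Set.add st.2.2 n)
        else st) st := by
  unfold pvNbrsA
  rw [List.foldl_map, ← PySem.List.foldl_ite_eq_foldl_filter]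
  apply PySem.List.foldl_congr_mem
  intro acc d _
  by_cases hp : (0 ≤ cur.1 + d.1 ∧ cur.1 + d.1 < W ∧ 0 ≤ cur.2 + d.2 ∧ cur.2 + d.2 < H) <;>
    by_cases hq : pvGet acc.1 (cur.1 + d.1) (cur.2 + d.2) = v <;>
      simp [hp, hq]

theorem pvBfs_eq (W H : Int) (v : Char) :
    ∀ (fuel : Nat) (st : List (List Char) × List PvCell × PySem.Set PvCell),
      pvBfsB W H v fuel st = pvBfsA W H v fuel st := by
  intro fuel
  induction fuel with
  | zero => intro ⟨g, q, reg⟩; rfl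
  | succ f ih =>
      intro ⟨g, q, reg⟩
      match q with
      | [] => rfl
      | cur :: rest =>
          show pvBfsB W H v f _ = pvBfsA W H v f _
          rw [ih, pvStep_eq]
theorem pvBfsA_reg_nodup (W H : Int) (v : Char) :
    ∀ (fuel : Nat) (st : List (List Char) × List PvCell × PySem.Set PvCell),
      st.2.2.Nodup → ((pvBfsA W H v fuel st).2).Nodup := by
  intro fuel
  induction fuel with
  | zero => intro ⟨g, q, reg⟩ h; exact h
  | succ f ih =>
      intro ⟨g, q, reg⟩ h
      match q with
      | [] => exact h
      | cur :: rest =>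
          show ((pvBfsA W H v f _).2).Nodup
          refine ih _ ?_
          have aux : ∀ (l : List PvCell) (st : List (List Char) × List PvCell × PySem.Set PvCell),
              st.2.2.Nodup →
              ((l.foldl (fun st n =>
                  if pvGet st.1 n.1 n.2 = v then
                    (pvMark st.1 n.1 n.2, st.2.1 ++ [n], PySem.Set.add st.2.2 n)
                  else st) st).2.2).Nodup := by
            intro l
            induction l with
            | nil => intro st h; exact h
            | cons n ns ihl =>
                intro st h
                simp only [List.foldl_cons]
                by_cases hc : pvGet st.1 n.1 n.2 = v
                · simp only [if_pos hc]; exact ihl _ (PySem.Set.nodup_add _ _ h)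
                · simp only [if_neg hc]; exact ihl _ h
          exact aux _ (g, rest, reg) h

theorem pvFloodA_nodup (W H : Int) :
    ∀ (cells : List PvCell) (g : List (List Char)) (regs : List (PySem.Set PvCell)),
      (∀ r ∈ regs, List.Nodup r) →
      ∀ r ∈ (cells.foldl (pvFloodA W H) (g, regs)).2, List.Nodup r := by
  intro cells
  induction cells with
  | nil => intro g regs h; exact h
  | cons cell rest ih =>
      intro g regs h
      simp only [List.foldl_cons]
      by_cases hc : pvGet g cell.1 cell.2 ≠ '#'
      · simp only [pvFloodA, if_pos hc]
        refine ih _ _ ?_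
        intro r hr
        rcases List.mem_append.1 hr with h1 | h2
        · exact h r h1
        · rcases List.mem_singleton.1 h2 with rfl
          exact pvBfsA_reg_nodup W H _ _ _ (by simp [PySem.Set.nodup_ofList])
      · simp only [pvFloodA, if_neg hc]
        exact ih _ _ h

theorem pvFlood_lockstep (W H : Int) :
    ∀ (cells : List PvCell) (g : List (List Char)) (regs : List (PySem.Set PvCell)) (t : Int),
      (cells.foldl (pvFloodB W H) (g, t)).1 = (cells.foldl (pvFloodA W H) (g, regs)).1 ∧
      ∃ newr : List (PySem.Set PvCell),
        (cells.foldl (pvFloodA W H) (g, regs)).2 = regs ++ newr ∧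
        (cells.foldl (pvFloodB W H) (g, t)).2 =
          t + (newr.map (fun reg => (reg.length : Int) * pvSidesB reg)).sum := by
  intro cells
  induction cells with
  | nil => intro g regs t; exact ⟨rfl, [], by simp, by simp⟩
  | cons cell rest ih =>
      intro g regs t
      simp only [List.foldl_cons]
      by_cases hc : pvGet g cell.1 cell.2 ≠ '#'
      · simp only [pvFloodA, pvFloodB, if_pos hc, pvBfs_eq]
        obtain ⟨h1, newr, h2, h3⟩ := ih
          (pvBfsA W H (pvGet g cell.1 cell.2) (W.toNat * H.toNat + 1)
            (pvMark g cell.1 cell.2, [cell], PySem.Set.ofList [cell])).1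
          (regs ++ [(pvBfsA W H (pvGet g cell.1 cell.2) (W.toNat * H.toNat + 1)
            (pvMark g cell.1 cell.2, [cell], PySem.Set.ofList [cell])).2])
          (t + ((pvBfsA W H (pvGet g cell.1 cell.2) (W.toNat * H.toNat + 1)
            (pvMark g cell.1 cell.2, [cell], PySem.Set.ofList [cell])).2.length : Int) *
            pvSidesB (pvBfsA W H (pvGet g cell.1 cell.2) (W.toNat * H.toNat + 1)
              (pvMark g cell.1 cell.2, [cell], PySem.Set.ofList [cell])).2)
        refine ⟨h1, (pvBfsA W H (pvGet g cell.1 cell.2) (W.toNat * H.toNat + 1)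
            (pvMark g cell.1 cell.2, [cell], PySem.Set.ofList [cell])).2 :: newr, ?_, ?_⟩
        · rw [h2]; simp
        · rw [h3]; simp; ring
      · simp only [pvFloodA, pvFloodB, if_neg hc]
        exact ih g regs t
-- membership in the regionSides fold (iteration list generalized for the induction)
theorem pvS_mem (reg : PySem.Set PvCell) (off : PvCell) :
    ∀ (l : List PvCell) (acc : PySem.Set PvCell) (x : PvCell),
      (x ∈ l.foldl (fun (s : PySem.Set PvCell) cell =>
          if (cell.1 + off.1, cell.2 + off.2) ∈ reg then s
          else PySem.Set.add s (cell.1 + off.1, cell.2 + off.2)) acc) ↔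
        x ∈ acc ∨ ∃ c ∈ l, x = (c.1 + off.1, c.2 + off.2) ∧ (c.1 + off.1, c.2 + off.2) ∉ reg := by
  intro l
  induction l with
  | nil => intro acc x; simp
  | cons c cs ih =>
      intro acc x
      simp only [List.foldl_cons]
      by_cases hc : (c.1 + off.1, c.2 + off.2) ∈ reg
      · rw [if_pos hc, ih]
        constructor
        · rintro (h | h)
          · exact Or.inl h
          · exact Or.inr (by obtain ⟨d, hd, he⟩ := h; exact ⟨d, List.mem_cons_of_mem _ hd, he⟩)
        · rintro (h | ⟨d, hd, he, hn⟩)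
          · exact Or.inl h
          · rcases List.mem_cons.1 hd with rfl | hd'
            · exact absurd hc (he ▸ hn)
            · exact Or.inr ⟨d, hd', he, hn⟩
      · rw [if_neg hc, ih]
        simp only [PySem.Set.mem_add, List.mem_cons]
        constructor
        · rintro ((h | h) | h)
          · exact Or.inl h
          · exact Or.inr ⟨c, Or.inl rfl, h, hc⟩
          · obtain ⟨d, hd, he⟩ := h; exact Or.inr ⟨d, Or.inr hd, he⟩
        · rintro (h | ⟨d, (rfl | hd), he, hn⟩)
          · exact Or.inl (Or.inl h)
          · exact Or.inl (Or.inr he)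
          · exact Or.inr ⟨d, hd, he, hn⟩

theorem pvS_nodup (reg : PySem.Set PvCell) (off : PvCell) :
    ∀ (l : List PvCell) (acc : PySem.Set PvCell), acc.Nodup →
      (l.foldl (fun (s : PySem.Set PvCell) cell =>
          if (cell.1 + off.1, cell.2 + off.2) ∈ reg then s
          else PySem.Set.add s (cell.1 + off.1, cell.2 + off.2)) acc).Nodup := by
  intro l
  induction l with
  | nil => intro acc h; exact h
  | cons c cs ih =>
      intro acc h
      simp only [List.foldl_cons]
      by_cases hc : (c.1 + off.1, c.2 + off.2) ∈ reg
      · rw [if_pos hc]; exact ih _ h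
      · rw [if_neg hc]; exact ih _ (PySem.Set.nodup_add _ _ h)

theorem pvWalk_mono (S : List PvCell) (perp : PvCell) :
    ∀ (fuel : Nat) (linked : PvCell) (acc : PySem.Set PvCell) (x : PvCell),
      x ∈ acc → x ∈ pvWalkA S perp fuel linked acc := by
  intro fuel
  induction fuel with
  | zero => intro linked acc x h; exact h
  | succ f ih =>
      intro linked acc x h
      show x ∈ (if linked ∈ S then _ else acc)
      by_cases hc : linked ∈ S
      · rw [if_pos hc]; exact ih _ _ _ ((PySem.Set.mem_add _ _ _).2 (Or.inl h))
      · rw [if_neg hc]; exact h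

theorem pvWalk_sub (S : List PvCell) (perp : PvCell) :
    ∀ (fuel : Nat) (linked : PvCell) (acc : PySem.Set PvCell),
      (linked.1 - perp.1, linked.2 - perp.2) ∈ S →
      (∀ y ∈ acc, y ∈ S ∧ (y.1 - perp.1, y.2 - perp.2) ∈ S) →
      ∀ x ∈ pvWalkA S perp fuel linked acc, x ∈ S ∧ (x.1 - perp.1, x.2 - perp.2) ∈ S := by
  intro fuel
  induction fuel with
  | zero => intro linked acc _ hacc x hx; exact hacc x hx
  | succ f ih =>
      intro linked acc hpred hacc x hx
      by_cases hc : linked ∈ S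
      · rw [show pvWalkA S perp (f + 1) linked acc =
            pvWalkA S perp f (linked.1 + perp.1, linked.2 + perp.2) (PySem.Set.add acc linked) from
              by simp [pvWalkA, if_pos hc]] at hx
        refine ih _ _ (by simpa using hc) ?_ x hx
        intro y hy
        rcases (PySem.Set.mem_add _ _ _).1 hy with h | rfl
        · exact hacc y h
        · exact ⟨hc, hpred⟩
      · rw [show pvWalkA S perp (f + 1) linked acc = acc from by simp [pvWalkA, if_neg hc]] at hx
        exact hacc x hx

theorem pvWalk_first (S : List PvCell) (perp : PvCell) (fuel : Nat) (x : PvCell)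
    (acc : PySem.Set PvCell) (hx : x ∈ S) : x ∈ pvWalkA S perp (fuel + 1) x acc := by
  rw [show pvWalkA S perp (fuel + 1) x acc =
      pvWalkA S perp fuel (x.1 + perp.1, x.2 + perp.2) (PySem.Set.add acc x) from
        by simp [pvWalkA, if_pos hx]]
  exact pvWalk_mono S perp _ _ _ _ ((PySem.Set.mem_add _ _ _).2 (Or.inr rfl))

theorem pvWalk_nodup (S : List PvCell) (perp : PvCell) :
    ∀ (fuel : Nat) (linked : PvCell) (acc : PySem.Set PvCell), acc.Nodup →
      (pvWalkA S perp fuel linked acc).Nodup := by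
  intro fuel
  induction fuel with
  | zero => intro _ acc h; exact h
  | succ f ih =>
      intro linked acc h
      by_cases hc : linked ∈ S
      · rw [show pvWalkA S perp (f + 1) linked acc =
            pvWalkA S perp f (linked.1 + perp.1, linked.2 + perp.2) (PySem.Set.add acc linked) from
              by simp [pvWalkA, if_pos hc]]
        exact ih _ _ (PySem.Set.nodup_add _ _ h)
      · rw [show pvWalkA S perp (f + 1) linked acc = acc from by simp [pvWalkA, if_neg hc]]
        exact h
theorem pvRemFold_mono (S : List PvCell) (p1 p2 : Int) :
    ∀ (l : List PvCell) (acc : PySem.Set PvCell) (x : PvCell), x ∈ acc →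
      x ∈ l.foldl (fun acc side =>
        pvWalkA S (p1, p2) (S.length + 1) (side.1 + p1, side.2 + p2) acc) acc := by
  intro l
  induction l with
  | nil => exact fun acc x h => h
  | cons s ss ih =>
      intro acc x h
      simp only [List.foldl_cons]
      exact ih _ x (pvWalk_mono S (p1, p2) _ _ acc x h)

theorem pvRem_mem (S : List PvCell) (p1 p2 : Int) (x : PvCell) :
    (x ∈ S.foldl (fun acc side =>
        pvWalkA S (p1, p2) (S.length + 1) (side.1 + p1, side.2 + p2) acc) []) ↔
      x ∈ S ∧ (x.1 - p1, x.2 - p2) ∈ S := by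
  constructor
  · suffices h : ∀ (l : List PvCell) (acc : PySem.Set PvCell),
        (∀ s ∈ l, s ∈ S) → (∀ y ∈ acc, y ∈ S ∧ (y.1 - p1, y.2 - p2) ∈ S) →
        ∀ x ∈ l.foldl (fun acc side =>
          pvWalkA S (p1, p2) (S.length + 1) (side.1 + p1, side.2 + p2) acc) acc,
          x ∈ S ∧ (x.1 - p1, x.2 - p2) ∈ S by
      intro hx
      exact h S [] (fun s hs => hs) (by simp) x hx
    intro l
    induction l with
    | nil => intro acc _ hacc x hx; exact hacc x hx
    | cons s ss ih =>
        intro acc hl hacc x hx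
        simp only [List.foldl_cons] at hx
        refine ih _ (fun t ht => hl t (List.mem_cons_of_mem _ ht)) ?_ x hx
        intro y hy
        refine pvWalk_sub S (p1, p2) _ _ _ ?_ hacc y hy
        show ((s.1 + p1) - p1, (s.2 + p2) - p2) ∈ S
        rw [show ((s.1 + p1) - p1, (s.2 + p2) - p2) = s by apply Prod.ext <;> simp]
        exact hl s List.mem_cons_self
  · rintro ⟨hxS, hpred⟩
    suffices h : ∀ (l : List PvCell) (acc : PySem.Set PvCell),
        (x.1 - p1, x.2 - p2) ∈ l →
        x ∈ l.foldl (fun acc side =>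
          pvWalkA S (p1, p2) (S.length + 1) (side.1 + p1, side.2 + p2) acc) acc from
      h S [] hpred
    intro l
    induction l with
    | nil => intro acc h; simp at h
    | cons s ss ih =>
        intro acc hmem
        simp only [List.foldl_cons]
        rcases List.mem_cons.1 hmem with he | hm
        · apply pvRemFold_mono
          subst he
          rw [show ((x.1 - p1, x.2 - p2).1 + p1, (x.1 - p1, x.2 - p2).2 + p2) = x by
            apply Prod.ext <;> simp]
          exact pvWalk_first S (p1, p2) _ x acc hxS
        · exact ih _ hm

theorem pvRem_nodup (S : List PvCell) (p1 p2 : Int) :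
    ∀ (l : List PvCell) (acc : PySem.Set PvCell), acc.Nodup →
      (l.foldl (fun acc side =>
        pvWalkA S (p1, p2) (S.length + 1) (side.1 + p1, side.2 + p2) acc) acc).Nodup := by
  intro l
  induction l with
  | nil => exact fun acc h => h
  | cons s ss ih =>
      intro acc h
      simp only [List.foldl_cons]
      exact ih _ (pvWalk_nodup S (p1, p2) _ _ acc h)

theorem pvSidesOffA_eq (reg : PySem.Set PvCell) (hnd : List.Nodup reg) (off : PvCell) :
    pvSidesOffA reg off = (reg.countP (fun c =>
      decide ((c.1 + off.1, c.2 + off.2) ∉ reg ∧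
        ((c.1 - off.2, c.2 - off.1) ∉ reg ∨
          (c.1 + off.1 - off.2, c.2 + off.2 - off.1) ∈ reg))) : Int) := by
  have congrMem : ∀ (a b c d : Int), a = c → b = d →
      (((a, b) : PvCell) ∈ reg ↔ ((c, d) : PvCell) ∈ reg) := by
    intro a b c d h1 h2; rw [h1, h2]
  simp only [pvSidesOffA]
  generalize hS : (List.foldl
      (fun (s : PySem.Set PvCell) cell =>
        if (cell.1 + off.1, cell.2 + off.2) ∈ reg then s
        else PySem.Set.add s (cell.1 + off.1, cell.2 + off.2)) [] reg) = S
  have hSmem : ∀ x : PvCell, x ∈ S ↔ ((x.1 - off.1, x.2 - off.2) ∈ reg ∧ x ∉ reg) := by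
    intro x
    rw [← hS, pvS_mem reg off reg [] x]
    simp only [List.not_mem_nil, false_or]
    constructor
    · rintro ⟨⟨c1, c2⟩, hc, rfl, hn⟩
      refine ⟨?_, hn⟩
      rw [show ((((c1, c2) : PvCell).1 + off.1, ((c1, c2) : PvCell).2 + off.2).1 - off.1,
          (((c1, c2) : PvCell).1 + off.1, ((c1, c2) : PvCell).2 + off.2).2 - off.2) = ((c1, c2) : PvCell) by
        apply Prod.ext <;> simp]
      exact hc
    · rintro ⟨hin, hout⟩
      refine ⟨(x.1 - off.1, x.2 - off.2), hin, ?_, ?_⟩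
      · apply Prod.ext <;> simp
      · rw [show (((x.1 - off.1, x.2 - off.2) : PvCell).1 + off.1,
            ((x.1 - off.1, x.2 - off.2) : PvCell).2 + off.2) = x by apply Prod.ext <;> simp]
        exact hout
  have hSnd : S.Nodup := hS ▸ pvS_nodup reg off reg [] List.nodup_nil
  have hR_nd : (S.foldl (fun acc side =>
      pvWalkA S (off.2, off.1) (S.length + 1) (side.1 + off.2, side.2 + off.1) acc) []).Nodup :=
    pvRem_nodup S off.2 off.1 S [] List.nodup_nil
  have hlen1 : (S.foldl (fun acc side =>
      pvWalkA S (off.2, off.1) (S.length + 1) (side.1 + off.2, side.2 + off.1) acc) []).length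
      = (S.filter (fun t => decide ((t.1 - off.2, t.2 - off.1) ∈ S))).length := by
    apply List.Perm.length_eq
    apply (List.perm_ext_iff_of_nodup hR_nd (hSnd.filter _)).2
    intro x
    rw [pvRem_mem]
    simp [List.mem_filter]
  have hlen2 : S.length = (S.filter (fun t => decide ((t.1 - off.2, t.2 - off.1) ∈ S))).length +
      (S.filter (fun t => !decide ((t.1 - off.2, t.2 - off.1) ∈ S))).length :=
    List.length_eq_length_filter_add _
  have hlen3 : (S.filter (fun t => !decide ((t.1 - off.2, t.2 - off.1) ∈ S))).length
      = reg.countP (fun c =>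
          decide ((c.1 + off.1, c.2 + off.2) ∉ reg ∧
            ((c.1 - off.2, c.2 - off.1) ∉ reg ∨
              (c.1 + off.1 - off.2, c.2 + off.2 - off.1) ∈ reg))) := by
    rw [List.countP_eq_length_filter]
    have hperm : (S.filter (fun t => !decide ((t.1 - off.2, t.2 - off.1) ∈ S))).Perm
        ((reg.filter (fun c =>
          decide ((c.1 + off.1, c.2 + off.2) ∉ reg ∧
            ((c.1 - off.2, c.2 - off.1) ∉ reg ∨
              (c.1 + off.1 - off.2, c.2 + off.2 - off.1) ∈ reg)))).map
          (fun c => (c.1 + off.1, c.2 + off.2))) := by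
      refine (List.perm_ext_iff_of_nodup (hSnd.filter _) ?_).2 ?_
      · refine List.Nodup.map ?_ (hnd.filter _)
        intro a b hab
        obtain ⟨a1, a2⟩ := a; obtain ⟨b1, b2⟩ := b
        simp only [Prod.mk.injEq] at hab ⊢
        omega
      · rintro ⟨x1, x2⟩
        simp only [List.mem_filter, List.mem_map, Bool.not_eq_true', decide_eq_false_iff_not,
          decide_eq_true_eq, hSmem, Prod.mk.injEq]
        constructor
        · rintro ⟨⟨hin, hout⟩, hnot⟩
          refine ⟨(x1 - off.1, x2 - off.2), ⟨hin, ?_, ?_⟩, by ring, by ring⟩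
          · intro hmem
            exact hout ((congrMem _ _ _ _ (by ring) (by ring)).1 hmem)
          · by_cases hb : ((x1 - off.2, x2 - off.1) : PvCell) ∈ reg
            · exact Or.inr ((congrMem _ _ _ _ (by ring) (by ring)).1 hb)
            · refine Or.inl ?_
              intro hcp
              exact hnot ⟨(congrMem _ _ _ _ (by ring) (by ring)).1 hcp, hb⟩
        · rintro ⟨⟨c1, c2⟩, ⟨hc, hn1, hdisj⟩, he1, he2⟩
          subst he1; subst he2
          refine ⟨⟨?_, hn1⟩, ?_⟩
          · exact (congrMem _ _ _ _ (by ring) (by ring)).1 hc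
          · rintro ⟨hA, hB⟩
            rcases hdisj with hL | hR
            · exact hL ((congrMem _ _ _ _ (by ring) (by ring)).1 hA)
            · exact hB ((congrMem _ _ _ _ (by ring) (by ring)).1 hR)
    simpa using hperm.length_eq
  rw [hlen1]
  omega
theorem pv_interchange (l m : List PvCell) (p : PvCell → PvCell → Bool) :
    (l.map (fun c => ((m.countP (fun d => p c d) : Nat) : Int))).sum
      = (m.map (fun d => ((l.countP (fun c => p c d) : Nat) : Int))).sum := by
  induction m with
  | nil => simp
  | cons d ds ih =>
      simp only [List.map_cons, List.sum_cons, List.countP_cons]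
      have : (l.map (fun c => ((List.countP (fun d => p c d) ds + if p c d = true then 1 else 0 : Nat) : Int))).sum
          = (l.map (fun c => ((List.countP (fun d => p c d) ds : Nat) : Int))).sum
            + (l.map (fun c => if p c d = true then (1 : Int) else 0)).sum := by
        rw [← PySem.List.sum_map_add_int]
        refine congrArg List.sum (List.map_congr_left ?_)
        intro c _
        split <;> simp
      rw [this, ih, PySem.List.sum_map_ite_one_zero]
      ring

theorem pvSideCount_eq (reg : PySem.Set PvCell) (hnd : List.Nodup reg) :
    pvSideCountA reg = pvSidesB reg := by
  unfold pvSideCountA pvSidesB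
  rw [PySem.List.foldl_add]
  have hinner : ∀ (k : Int) (cell : PvCell),
      pvDirs.foldl (fun k d =>
        if (cell.1 + d.1, cell.2 + d.2) ∉ reg ∧
            ((cell.1 - d.2, cell.2 - d.1) ∉ reg ∨
              (cell.1 + d.1 - d.2, cell.2 + d.2 - d.1) ∈ reg) then k + 1 else k) k
      = k + ((pvDirs.countP (fun d =>
          decide ((cell.1 + d.1, cell.2 + d.2) ∉ reg ∧
            ((cell.1 - d.2, cell.2 - d.1) ∉ reg ∨
              (cell.1 + d.1 - d.2, cell.2 + d.2 - d.1) ∈ reg))) : Nat) : Int) := by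
    intro k cell
    exact PySem.List.foldl_ite_add_one _ pvDirs k
  rw [PySem.List.foldl_congr_mem reg _
      (fun k cell => k + ((pvDirs.countP (fun d =>
          decide ((cell.1 + d.1, cell.2 + d.2) ∉ reg ∧
            ((cell.1 - d.2, cell.2 - d.1) ∉ reg ∨
              (cell.1 + d.1 - d.2, cell.2 + d.2 - d.1) ∈ reg))) : Nat) : Int)) 0
      (fun acc x _ => hinner acc x)]
  rw [PySem.List.foldl_add]
  rw [List.map_congr_left (fun off _ => pvSidesOffA_eq reg hnd off)]
  rw [pv_interchange reg pvDirs (fun c d =>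
      decide ((c.1 + d.1, c.2 + d.2) ∉ reg ∧
        ((c.1 - d.2, c.2 - d.1) ∉ reg ∨ (c.1 + d.1 - d.2, c.2 + d.2 - d.1) ∈ reg)))]
theorem pvScan_eq (W H : Int) (g : List (List Char)) (t : Int) :
    ((PySem.List.pyRange 0 H 1).foldl (fun st r =>
        (PySem.List.pyRange 0 W 1).foldl (fun st c => pvFloodB W H st ((c, r) : PvCell)) st) (g, t))
      = ((PySem.List.pyRange 0 H 1).flatMap
          (fun r => (PySem.List.pyRange 0 W 1).map (fun c => ((c, r) : PvCell)))).foldl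
            (pvFloodB W H) (g, t) := by
  rw [List.flatMap_def, List.foldl_flatten, List.foldl_map]
  simp only [List.foldl_map]

theorem pv_main (values : List String) : calculate values = calculate_alt values := by
  simp only [calculate, calculate_alt]
  rw [pvScan_eq]
  obtain ⟨h1, newr, h2, h3⟩ := pvFlood_lockstep
    (((values.map String.toList).headD []).length : Int) ((values.map String.toList).length : Int)
    ((PySem.List.pyRange 0 ((values.map String.toList).length : Int) 1).flatMap
      (fun r => (PySem.List.pyRange 0 (((values.map String.toList).headD []).length : Int) 1).map
        (fun c => ((c, r) : PvCell))))
    (values.map String.toList) [] 0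
  have hnods : ∀ r ∈ newr, List.Nodup r := by
    have h := pvFloodA_nodup
      (((values.map String.toList).headD []).length : Int) ((values.map String.toList).length : Int)
      ((PySem.List.pyRange 0 ((values.map String.toList).length : Int) 1).flatMap
        (fun r => (PySem.List.pyRange 0 (((values.map String.toList).headD []).length : Int) 1).map
          (fun c => ((c, r) : PvCell))))
      (values.map String.toList) [] (by simp)
    rw [h2] at h
    simpa using h
  rw [h3, h2, List.nil_append, PySem.List.foldl_add]
  refine congrArg (fun z => (0 : Int) + z) (congrArg List.sum (List.map_congr_left ?_))
  intro reg hreg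
  rw [pvSideCount_eq reg (hnods reg hreg)]

-- ===== VERDICT (by name: the statement is the Claim_ definition above) =====
theorem calculate_spec : Claim_equal_calculate := by
  intro values _ _
  unfold Spec_calculate
  exact pv_main values
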